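-- pv_equiv track=rewrite | github.com/FocusWilliam/FWG | src/FWG/utils.py | check
-- ===== SOURCE A (Python) =====
-- def check(token, A_list):
--     # example: drink in ["alcohol drink", "rice"]
--     x = [i.split(" ") for i in A_list]
--     y = []
--     for i in x:
--         y.append(i[-1])
--         try:
--             y.append(" ".join(i[-2:]))
--         except:
--             pass
--         try:
--             y.append(" ".join(i[-3:]))
--         except:
--             pass
--     if token in y:
--         return True
--     else:
--         return False
-- ===== SOURCE B (Python) =====
-- def check(token, A_list):
--     n = len(token.split(" "))
--     if n > 3:
--         return False
--     for entry in A_list: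
--         words = entry.split(" ")
--         if " ".join(words[-n:]) == token:
--             return True
--     return False
-- ===== Notes on version B (the rewrite author's own statement) =====
-- stated objective: faster
-- what changed: Instead of materialising all 1/2/3-word suffixes of every entry into one list and then testing membership, B keys on the token's word count n, rejects n not in 1..3 immediately, and compares only the single n-word suffix of each entry, returning on the first match.
import Mathlib
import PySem

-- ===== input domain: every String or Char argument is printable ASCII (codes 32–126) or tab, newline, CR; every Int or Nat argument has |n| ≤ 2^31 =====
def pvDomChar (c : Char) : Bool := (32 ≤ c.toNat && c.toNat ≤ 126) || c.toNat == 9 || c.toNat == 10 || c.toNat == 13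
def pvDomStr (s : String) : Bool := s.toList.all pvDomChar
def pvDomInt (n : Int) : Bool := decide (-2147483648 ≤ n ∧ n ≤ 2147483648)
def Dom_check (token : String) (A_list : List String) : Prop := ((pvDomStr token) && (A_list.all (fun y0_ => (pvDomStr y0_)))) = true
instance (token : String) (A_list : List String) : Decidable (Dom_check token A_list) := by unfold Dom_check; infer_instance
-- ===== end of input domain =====

-- B keys the scan on the token's word count and compares one suffix per entry instead of
-- materialising every 1–3 word suffix of every entry into a list; objective: simpler.

-- shared helper: Python's  s.split(" ")  (non-empty separator, never raises)
def pySplitSpace (s : String) : List String :=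
  (PySem.Chars.splitOn s.toList [' ']).map String.ofList

-- ===== PORT A =====
def check (token : String) (A_list : List String) : Bool :=
  let x := A_list.map (fun i => pySplitSpace i)
  let y := x.foldl (fun y i =>
      ((y ++ [(PySem.List.pyGet? i (-1)).getD ""])      -- i[-1]; split(" ") is never empty, so the IndexError default "" is unreachable
        ++ [PySem.Str.join " " (PySem.List.slice i (some (-2)) none)])
        ++ [PySem.Str.join " " (PySem.List.slice i (some (-3)) none)]) []
  if y.contains token then true else false

-- ===== PORT B =====
def check_alt (token : String) (A_list : List String) : Bool :=
  let n := (pySplitSpace token).length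
  if 3 < n then false
  else A_list.any (fun entry =>
    let words := pySplitSpace entry
    PySem.Str.join " " (PySem.List.slice words (some (-(n : Int))) none) == token)

-- ===== PRECONDITION & SPEC =====
def Spec_check (token : String) (A_list : List String) (out : Bool) : Prop := out = check_alt token A_list
instance (token : String) (A_list : List String) (out : Bool) : Decidable (Spec_check token A_list out) := by unfold Spec_check; infer_instance

-- ===== CLAIM (what is proved, stated in full; the proofs are below) =====
def Claim_equal_check : Prop := ∀ (token : String) (A_list : List String), Dom_check token A_list → Spec_check token A_list (check token A_list)

-- ===== LEMMAS AND PROOFS =====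

-- the splitting function, restated as a clean structural recursion
def mySplit : List Char → List (List Char)
  | [] => [[]]
  | c :: r => if c = ' ' then [] :: mySplit r else (mySplit r).modifyHead (c :: ·)

theorem go_eq (l : List Char) : ∀ (fuel : ℕ) (cur : List Char) (acc : List (List Char)),
    l.length ≤ fuel →
    PySem.Chars.splitOn.go [' '] fuel l cur acc
      = acc.reverse ++ (mySplit l).modifyHead (fun x => cur.reverse ++ x) := by
  induction l with
  | nil =>
    intro fuel cur acc _
    cases fuel <;> simp [PySem.Chars.splitOn.go, mySplit, List.modifyHead]
  | cons c rest ih =>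
    intro fuel cur acc h
    cases fuel with
    | zero => simp at h
    | succ fuel =>
      by_cases hc : c = ' '
      · subst hc
        rw [PySem.Chars.splitOn.go.eq_def]
        have hpre : [' '].isPrefixOf (' ' :: rest) = true := by simp [List.isPrefixOf]
        simp only [hpre, if_true]
        rw [show List.drop [' '].length (' ' :: rest) = rest from rfl]
        rw [ih fuel [] ((cur.reverse) :: acc) (by simpa using Nat.le_of_succ_le_succ h)]
        cases hm : mySplit rest <;> simp [mySplit, hm, List.modifyHead]
      · rw [PySem.Chars.splitOn.go.eq_def]
        have hpre : [' '].isPrefixOf (c :: rest) = false := by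
          have hb : (' ' == c) = false := beq_eq_false_iff_ne.mpr (Ne.symm hc)
          simp [List.isPrefixOf, hb]
        simp only [hpre, Bool.false_eq_true, if_false]
        rw [ih fuel (c :: cur) acc (by simpa using Nat.le_of_succ_le_succ h)]
        cases hm : mySplit rest <;> simp [mySplit, hc, hm, List.modifyHead]

theorem splitOn_eq_mySplit (s : List Char) : PySem.Chars.splitOn s [' '] = mySplit s := by
  have h := go_eq s (s.length + 1) [] [] (by omega)
  rw [show PySem.Chars.splitOn s [' '] = PySem.Chars.splitOn.go [' '] (s.length + 1) s [] [] from rfl, h]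
  cases hm : mySplit s <;> simp [List.modifyHead]

theorem mySplit_ne_nil (s : List Char) : mySplit s ≠ [] := by
  induction s with
  | nil => simp [mySplit]
  | cons c r ih =>
    by_cases hc : c = ' '
    · simp [mySplit, hc]
    · cases hm : mySplit r with
      | nil => exact absurd hm ih
      | cons q qs => simp [mySplit, hc, hm, List.modifyHead]

theorem mySplit_no_space (s : List Char) : ∀ p ∈ mySplit s, ' ' ∉ p := by
  induction s with
  | nil =>
    intro p hp
    simp [mySplit] at hp
    simp [hp]
  | cons c r ih =>
    intro p hp
    by_cases hc : c = ' '
    · simp [mySplit, hc] at hp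
      rcases hp with rfl | hp
      · simp
      · exact ih p hp
    · cases hm : mySplit r with
      | nil => exact absurd hm (mySplit_ne_nil r)
      | cons q qs =>
        simp [mySplit, hc, hm, List.modifyHead] at hp
        rcases hp with rfl | hp
        · intro hmem
          rcases List.mem_cons.mp hmem with h | h
          · exact hc h.symm
          · exact ih q (by rw [hm]; exact List.mem_cons_self) h
        · exact ih p (by rw [hm]; exact List.mem_cons_of_mem _ hp)

theorem mySplit_append (p t : List Char) (h : ' ' ∉ p) :
    mySplit (p ++ t) = (mySplit t).modifyHead (fun x => p ++ x) := by
  induction p with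
  | nil => cases hm : mySplit t <;> simp [hm, List.modifyHead]
  | cons c p ih =>
    rw [List.mem_cons, not_or] at h
    obtain ⟨h1, h2⟩ := h
    have hc : ¬ c = ' ' := fun e => h1 e.symm
    rw [List.cons_append]
    show mySplit (c :: (p ++ t)) = _
    rw [show mySplit (c :: (p ++ t)) = (mySplit (p ++ t)).modifyHead (c :: ·) by simp [mySplit, hc]]
    rw [ih h2]
    cases hm : mySplit t <;> simp [List.modifyHead]

theorem join_singleton (p : List Char) : PySem.Chars.join [' '] [p] = p := by
  simp [PySem.Chars.join, List.intercalate, List.intersperse]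

theorem mySplit_join (ps : List (List Char)) (h1 : ps ≠ []) (h2 : ∀ p ∈ ps, ' ' ∉ p) :
    mySplit (PySem.Chars.join [' '] ps) = ps := by
  induction ps with
  | nil => exact absurd rfl h1
  | cons p ps ih =>
    cases ps with
    | nil =>
      have hp : ' ' ∉ p := h2 p (by simp)
      rw [join_singleton]
      have h' := mySplit_append p [] hp
      simp [mySplit, List.modifyHead] at h'
      exact h'
    | cons q qs =>
      have hp : ' ' ∉ p := h2 p (by simp)
      have hj : PySem.Chars.join [' '] (p :: q :: qs) = p ++ ' ' :: PySem.Chars.join [' '] (q :: qs) := by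
        simp [PySem.Chars.join, List.intercalate, List.intersperse]
      rw [hj, mySplit_append p _ hp,
        show mySplit (' ' :: PySem.Chars.join [' '] (q :: qs)) = [] :: mySplit (PySem.Chars.join [' '] (q :: qs)) by simp [mySplit]]
      rw [ih (by simp) (fun r hr => h2 r (List.mem_cons_of_mem _ hr))]
      simp [List.modifyHead]

-- the joined k-word suffix, at the Chars level
def lastJ (w : List (List Char)) (k : ℕ) : List Char :=
  PySem.Chars.join [' '] (w.drop (w.length - k))

theorem slice_neg {α : Type} (w : List α) (k : ℕ) (hk : 1 ≤ k) :
    PySem.List.slice w (some (-(k : Int))) none = w.drop (w.length - k) := by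
  simp only [PySem.List.slice, PySem.List.clampIdx]
  split_ifs with hneg hsum
  · -- -(k) < 0, length + -(k) < 0 : drop 0
    have hlt : w.length < k := by omega
    rw [show w.length - k = 0 by omega]
    simp [List.take_of_length_le]
  · -- -(k) < 0, length + -(k) ≥ 0
    have hle : k ≤ w.length := by omega
    rw [show ((w.length : Int) + -(k : Int)).toNat = w.length - k by omega]
    apply List.take_of_length_le
    simp [List.length_drop]
  · omega

theorem mySplit_lastJ (e : List Char) (k : ℕ) (hk : 1 ≤ k) :
    mySplit (lastJ (mySplit e) k) = (mySplit e).drop ((mySplit e).length - k) := by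
  have hlenpos : 0 < (mySplit e).length := List.length_pos_iff.mpr (mySplit_ne_nil e)
  have hne : (mySplit e).drop ((mySplit e).length - k) ≠ [] := by
    intro hdrop
    have hlen := congrArg List.length hdrop
    simp [List.length_drop] at hlen
    omega
  simp only [lastJ]
  exact mySplit_join _ hne (fun p hp => mySplit_no_space e p (List.mem_of_mem_drop hp))

theorem entry_fwd (t e : List Char) (k : ℕ) (hk1 : 1 ≤ k) (hk3 : k ≤ 3)
    (h : t = lastJ (mySplit e) k) :
    (mySplit t).length ≤ 3 ∧ t = lastJ (mySplit e) (mySplit t).length := by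
  subst h
  have hlenpos : 0 < (mySplit e).length := List.length_pos_iff.mpr (mySplit_ne_nil e)
  have hms := mySplit_lastJ e k hk1
  rw [hms]
  simp only [List.length_drop]
  refine ⟨by omega, ?_⟩
  have harith : (mySplit e).length - ((mySplit e).length - ((mySplit e).length - k)) = (mySplit e).length - k := by omega
  simp only [lastJ, harith]

theorem entry_core (t e : List Char) :
    (t = lastJ (mySplit e) 1 ∨ t = lastJ (mySplit e) 2 ∨ t = lastJ (mySplit e) 3)
      ↔ ((mySplit t).length ≤ 3 ∧ t = lastJ (mySplit e) (mySplit t).length) := by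
  constructor
  · rintro (h | h | h)
    · exact entry_fwd t e 1 (by norm_num) (by norm_num) h
    · exact entry_fwd t e 2 (by norm_num) (by norm_num) h
    · exact entry_fwd t e 3 (by norm_num) (by norm_num) h
  · rintro ⟨h3, ht⟩
    have h1 : 1 ≤ (mySplit t).length := List.length_pos_iff.mpr (mySplit_ne_nil t)
    have hcase : (mySplit t).length = 1 ∨ (mySplit t).length = 2 ∨ (mySplit t).length = 3 := by omega
    rcases hcase with h | h | h
    · left; rw [h] at ht; exact ht
    · right; left; rw [h] at ht; exact ht
    · right; right; rw [h] at ht; exact ht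

-- bridges from the String-level ports to the Chars level
theorem pySplitSpace_eq (s : String) : pySplitSpace s = (mySplit s.toList).map String.ofList := by
  simp [pySplitSpace, splitOn_eq_mySplit]

theorem str_eq_iff (s t : String) : s = t ↔ s.toList = t.toList :=
  ⟨fun h => by rw [h], fun h => String.toList_inj.mp h⟩

theorem join_slice_toList (e : String) (k : ℕ) (hk : 1 ≤ k) :
    (PySem.Str.join " " (PySem.List.slice (pySplitSpace e) (some (-(k : Int))) none)).toList
      = lastJ (mySplit e.toList) k := by
  rw [pySplitSpace_eq, slice_neg _ k hk, PySem.Str.toList_join]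
  have hsp : (" " : String).toList = [' '] := by decide
  simp [hsp, lastJ, List.length_map, ← List.map_drop, List.map_map, Function.comp_def,
    String.toList_ofList]

theorem pyGet_neg_one {α : Type} (l : List α) (h : l ≠ []) :
    PySem.List.pyGet? l (-1) = l.getLast? := by
  have hpos : 0 < l.length := List.length_pos_iff.mpr h
  have h0 : ¬ (0 : Int) ≤ -1 := by norm_num
  have h2 : -(l.length : Int) ≤ -1 := by omega
  rw [List.getLast?_eq_getElem?]
  simp [PySem.List.pyGet?, PySem.List.pyIdx?, h2]

theorem g1_toList (e : String) :
    ((PySem.List.pyGet? (pySplitSpace e) (-1)).getD "").toList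
      = lastJ (mySplit e.toList) 1 := by
  have hne : mySplit e.toList ≠ [] := mySplit_ne_nil e.toList
  have hpos : 0 < (mySplit e.toList).length := List.length_pos_iff.mpr hne
  have hne' : (mySplit e.toList).map String.ofList ≠ [] := by simp [hne]
  rw [pySplitSpace_eq, pyGet_neg_one _ hne', List.getLast?_map]
  cases hl : (mySplit e.toList).getLast? with
  | none => exact absurd (List.getLast?_eq_none_iff.mp hl) hne
  | some p =>
    simp only [Option.map_some, Option.getD_some, String.toList_ofList]
    rw [List.getLast?_eq_getElem?] at hl
    obtain ⟨hlt, hp⟩ := List.getElem?_eq_some_iff.mp hl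
    have hd : (mySplit e.toList).drop ((mySplit e.toList).length - 1) = [p] := by
      rw [List.drop_length_sub_one hne, List.getLast_eq_getElem, hp]
    simp [lastJ, hd]

theorem join_slice_toList' (e : String) (k : ℕ) (kI : Int) (hk : 1 ≤ k)
    (hkI : kI = -(k : Int)) :
    (PySem.Str.join " " (PySem.List.slice (pySplitSpace e) (some kI) none)).toList
      = lastJ (mySplit e.toList) k := by
  subst hkI; exact join_slice_toList e k hk

theorem bool_eq_iff (a b : Bool) : a = b ↔ (a = true ↔ b = true) := by
  cases a <;> cases b <;> simp

theorem if_bool (b : Bool) : (if b then true else false) = b := by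
  cases b <;> simp

theorem fold_three (l : List (List String)) :
    l.foldl (fun y i =>
      ((y ++ [(PySem.List.pyGet? i (-1)).getD ""])
        ++ [PySem.Str.join " " (PySem.List.slice i (some (-2)) none)])
        ++ [PySem.Str.join " " (PySem.List.slice i (some (-3)) none)]) []
    = l.flatMap (fun i =>
        [(PySem.List.pyGet? i (-1)).getD "",
         PySem.Str.join " " (PySem.List.slice i (some (-2)) none),
         PySem.Str.join " " (PySem.List.slice i (some (-3)) none)]) := by
  have hstep : (fun (y : List String) (i : List String) =>
      ((y ++ [(PySem.List.pyGet? i (-1)).getD ""])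
        ++ [PySem.Str.join " " (PySem.List.slice i (some (-2)) none)])
        ++ [PySem.Str.join " " (PySem.List.slice i (some (-3)) none)])
      = (fun (y : List String) (i : List String) => y ++
          [(PySem.List.pyGet? i (-1)).getD "",
           PySem.Str.join " " (PySem.List.slice i (some (-2)) none),
           PySem.Str.join " " (PySem.List.slice i (some (-3)) none)]) := by
    funext y i; simp
  rw [hstep, PySem.List.foldl_append_eq_flatMap, List.nil_append]

theorem lhs_iff (token : String) (A_list : List String) :
    check token A_list = true ↔
      ∃ e ∈ A_list, (token.toList = lastJ (mySplit e.toList) 1 ∨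
                     token.toList = lastJ (mySplit e.toList) 2 ∨
                     token.toList = lastJ (mySplit e.toList) 3) := by
  simp only [check, fold_three, if_bool]
  rw [List.contains_iff_mem, List.mem_flatMap]
  constructor
  · rintro ⟨i, hi, hmem⟩
    rcases List.mem_map.mp hi with ⟨e, he, rfl⟩
    refine ⟨e, he, ?_⟩
    simp only [List.mem_cons, List.not_mem_nil, or_false] at hmem
    rcases hmem with h | h | h
    · left; rw [h]; exact g1_toList e
    · right; left; rw [h]; exact join_slice_toList' e 2 (-2) (by norm_num) (by norm_num)
    · right; right; rw [h]; exact join_slice_toList' e 3 (-3) (by norm_num) (by norm_num)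
  · rintro ⟨e, he, hmem⟩
    refine ⟨pySplitSpace e, List.mem_map.mpr ⟨e, he, rfl⟩, ?_⟩
    simp only [List.mem_cons, List.not_mem_nil, or_false]
    rcases hmem with h | h | h
    · left; exact (str_eq_iff _ _).mpr (by rw [g1_toList e]; exact h)
    · right; left
      exact (str_eq_iff _ _).mpr (by rw [join_slice_toList' e 2 (-2) (by norm_num) (by norm_num)]; exact h)
    · right; right
      exact (str_eq_iff _ _).mpr (by rw [join_slice_toList' e 3 (-3) (by norm_num) (by norm_num)]; exact h)

theorem rhs_iff (token : String) (A_list : List String) :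
    check_alt token A_list = true ↔
      ((mySplit token.toList).length ≤ 3 ∧
        ∃ e ∈ A_list, token.toList = lastJ (mySplit e.toList) (mySplit token.toList).length) := by
  have hnn : (pySplitSpace token).length = (mySplit token.toList).length := by
    rw [pySplitSpace_eq]; simp
  have h1 : 1 ≤ (mySplit token.toList).length :=
    List.length_pos_iff.mpr (mySplit_ne_nil token.toList)
  simp only [check_alt, hnn]
  by_cases hbig : 3 < (mySplit token.toList).length
  · rw [if_pos hbig]
    constructor
    · intro hfalse; exact absurd hfalse (by simp)
    · rintro ⟨hle, _⟩; omega
  · rw [if_neg hbig, List.any_eq_true]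
    constructor
    · rintro ⟨e, he, hbeq⟩
      refine ⟨by omega, e, he, ?_⟩
      have hj := join_slice_toList e ((mySplit token.toList).length) h1
      rw [← hj]
      exact (congrArg String.toList (eq_of_beq hbeq)).symm
    · rintro ⟨_, e, he, ht⟩
      refine ⟨e, he, ?_⟩
      apply beq_iff_eq.mpr
      exact (str_eq_iff _ _).mpr (by rw [join_slice_toList e _ h1]; exact ht.symm)

-- ===== main equality =====
theorem main_iff (token : String) (A_list : List String) :
    check token A_list = check_alt token A_list := by
  rw [bool_eq_iff, lhs_iff, rhs_iff]
  constructor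
  · rintro ⟨e, he, hmem⟩
    have h := (entry_core token.toList e.toList).mp hmem
    exact ⟨h.1, e, he, h.2⟩
  · rintro ⟨h3, e, he, ht⟩
    exact ⟨e, he, (entry_core token.toList e.toList).mpr ⟨h3, ht⟩⟩

-- ===== VERDICT (by name: the statement is the Claim_ definition above) =====
theorem check_spec : Claim_equal_check := by
  intro token A_list _
  unfold Spec_check
  exact main_iff token A_list
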